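-- pv_equiv track=rewrite | github.com/leadsgroup/RCAIDE_GUI | tabs/solve/solve.py | _summarize_solve_output
-- ===== SOURCE A (Python) =====
-- def _summarize_solve_output(output):
--     # Return empty list if solver produced no output
--     if not output:
--         return []
--
--     # Store extracted warning messages
--     warnings = []
--
--     # Split solver output into individual lines
--     lines = output.splitlines()
--     idx = 0
--
--     # Iterate through all output lines
--     while idx < len(lines):
--         line = lines[idx].strip()
--
--         # Capture non-converged segment warnings
--         if "Segment did not converge" in line:
--             warnings.append(line)
--             idx += 1
--             continue
--
--         # Capture multi-line error messages
--         if line.startswith("Error Message:"):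
--             idx += 1
--             msg_lines = []
--
--             # Collect error message details until solver moves on
--             while idx < len(lines):
--                 nxt = lines[idx].strip()
--                 if not nxt or nxt.startswith("Solving"):
--                     break
--                 msg_lines.append(nxt)
--                 idx += 1
--
--             # Store the full error message as one warning
--             if msg_lines:
--                 warnings.append("Error: " + " ".join(msg_lines))
--             continue
--
--         # Move to the next line
--         idx += 1
--
--     # Return all detected solver warnings
--     return warnings
-- ===== SOURCE B (Python) =====
-- def _summarize_solve_output(output):
--     # Single pass over the lines with an explicit collecting state.
--     if not output:
--         return []
--     warnings = []
--     collecting = False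
--     msg = []
--     for raw in output.splitlines():
--         line = raw.strip()
--         if collecting and line and not line.startswith("Solving"):
--             msg.append(line)
--             continue
--         # flush any pending error message, then handle this line normally
--         if msg:
--             warnings.append("Error: " + " ".join(msg))
--         collecting = False
--         msg = []
--         if "Segment did not converge" in line:
--             warnings.append(line)
--         elif line.startswith("Error Message:"):
--             collecting = True
--     if msg:
--         warnings.append("Error: " + " ".join(msg))
--     return warnings
-- ===== Notes on version B (the rewrite author's own statement) =====
-- stated objective: simpler
-- what changed: Replaced the index-driven outer while-loop with a nested inner collection loop by a single for-loop over the lines that maintains a boolean state flag and a pending message buffer, flushing on terminator lines and at end of input.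
import Mathlib
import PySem

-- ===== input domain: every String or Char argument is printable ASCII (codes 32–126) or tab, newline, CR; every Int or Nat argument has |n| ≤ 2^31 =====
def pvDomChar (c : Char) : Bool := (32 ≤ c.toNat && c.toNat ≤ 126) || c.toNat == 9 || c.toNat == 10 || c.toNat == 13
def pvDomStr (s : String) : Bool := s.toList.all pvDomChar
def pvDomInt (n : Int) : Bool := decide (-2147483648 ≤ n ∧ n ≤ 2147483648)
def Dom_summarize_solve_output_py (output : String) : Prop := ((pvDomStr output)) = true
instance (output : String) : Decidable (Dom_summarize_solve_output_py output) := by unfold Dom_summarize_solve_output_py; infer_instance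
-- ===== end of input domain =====

-- B replaces A's index-driven while-loop with nested inner collection loop by one
-- for-loop over the lines maintaining a 'collecting' flag and a pending buffer (simpler).

-- ===== PORT A =====
-- inner 'while idx < len(lines)' collection loop: returns (msg_lines, remaining lines)
def pvCollectA (ls : List String) (acc : List String) : List String × List String :=
  match ls with
  | [] => (acc, [])
  | l :: rs =>
    let nxt := PySem.Str.strip l
    if nxt == "" || PySem.Str.startswith nxt "Solving" then (acc, l :: rs)
    else pvCollectA rs (acc ++ [nxt])

lemma pvCollectA_len (ls acc : List String) : (pvCollectA ls acc).2.length ≤ ls.length := by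
  induction ls generalizing acc with
  | nil => simp [pvCollectA]
  | cons l rs ih =>
    simp only [pvCollectA]
    split
    · simp
    · exact le_trans (ih _) (Nat.le_succ _)

-- outer 'while idx < len(lines)' loop of A
def pvLoopA (ls : List String) (warnings : List String) : List String :=
  match ls with
  | [] => warnings
  | l :: rest =>
    let line := PySem.Str.strip l
    if PySem.Str.isIn "Segment did not converge" line then
      pvLoopA rest (warnings ++ [line])
    else if PySem.Str.startswith line "Error Message:" then
      let p := pvCollectA rest []
      pvLoopA p.2 (if p.1.isEmpty then warnings
                   else warnings ++ ["Error: " ++ PySem.Str.join " " p.1])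
    else pvLoopA rest warnings
termination_by ls.length
decreasing_by
  · simp
  · exact Nat.lt_succ_of_le (pvCollectA_len rest [])
  · simp

def summarize_solve_output_py (output : String) : List String :=
  if output == "" then []
  else pvLoopA (PySem.Str.splitlines output) []

-- ===== PORT B =====
-- single for-loop over the lines with state (warnings, collecting, msg)
def pvLoopB (ls : List String) (w : List String) (c : Bool) (m : List String) : List String :=
  match ls with
  | [] => if m.isEmpty then w else w ++ ["Error: " ++ PySem.Str.join " " m]
  | l :: rest =>
    let line := PySem.Str.strip l
    if c && !(line == "") && !(PySem.Str.startswith line "Solving") then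
      pvLoopB rest w c (m ++ [line])
    else
      let w1 := if m.isEmpty then w else w ++ ["Error: " ++ PySem.Str.join " " m]
      if PySem.Str.isIn "Segment did not converge" line then
        pvLoopB rest (w1 ++ [line]) false []
      else if PySem.Str.startswith line "Error Message:" then
        pvLoopB rest w1 true []
      else
        pvLoopB rest w1 false []

def summarize_solve_output_py_alt (output : String) : List String :=
  if output == "" then []
  else pvLoopB (PySem.Str.splitlines output) [] false []

-- ===== PRECONDITION & SPEC =====
def Spec_summarize_solve_output_py (output : String) (out : List String) : Prop := out = summarize_solve_output_py_alt output
instance (output : String) (out : List String) : Decidable (Spec_summarize_solve_output_py output out) := by unfold Spec_summarize_solve_output_py; infer_instance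

-- ===== CLAIM (what is proved, stated in full; the proofs are below) =====
def Claim_equal_summarize_solve_output_py : Prop := ∀ (output : String), Dom_summarize_solve_output_py output → Spec_summarize_solve_output_py output (summarize_solve_output_py output)

-- ===== LEMMAS AND PROOFS =====

def pvFlush (w m : List String) : List String :=
  if m.isEmpty then w else w ++ ["Error: " ++ PySem.Str.join " " m]

-- joint invariant: B's loop with flag off and empty buffer equals A's outer
-- loop, and B's loop in collecting state equals A's inner collection followed by the
-- outer loop on the remaining lines.
lemma pvMain : ∀ n (ls : List String), ls.length ≤ n →
    (∀ w, pvLoopB ls w false [] = pvLoopA ls w) ∧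
    (∀ w m, pvLoopB ls w true m =
      pvLoopA (pvCollectA ls m).2 (pvFlush w (pvCollectA ls m).1)) := by
  intro n
  induction n with
  | zero =>
    intro ls hls
    have : ls = [] := List.eq_nil_of_length_eq_zero (Nat.le_zero.mp hls)
    subst this
    exact ⟨fun w => by simp [pvLoopB, pvLoopA],
           fun w m => by simp [pvLoopB, pvCollectA, pvLoopA, pvFlush]⟩
  | succ n ih =>
    intro ls hls
    match ls with
    | [] =>
      exact ⟨fun w => by simp [pvLoopB, pvLoopA],
             fun w m => by simp [pvLoopB, pvCollectA, pvLoopA, pvFlush]⟩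
    | l :: rest =>
      have hr : rest.length ≤ n := Nat.le_of_succ_le_succ hls
      obtain ⟨ihEQ, ihCOL⟩ := ih rest hr
      constructor
      · -- non-collecting step: both sides dispatch on the same line tests
        intro w
        simp only [pvLoopB, pvLoopA, Bool.false_and, if_false, Bool.false_eq_true,
          List.isEmpty_nil, if_true]
        split
        · exact ihEQ _
        · split
          · rw [ihCOL]; simp [pvFlush]
          · exact ihEQ _
      · -- collecting step: case on whether the line terminates the message
        intro w m
        cases hb1 : (PySem.Str.strip l == "") with
        | true =>
          simp only [pvLoopB, pvCollectA, hb1, Bool.not_true, Bool.and_false,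
            Bool.false_and, Bool.true_or, if_true, if_false, Bool.false_eq_true]
          conv_rhs => rw [pvLoopA]
          simp only []
          split
          · exact ihEQ _
          · split
            · rw [ihCOL]; simp [pvFlush]
            · exact ihEQ _
        | false =>
          cases hb2 : PySem.Str.startswith (PySem.Str.strip l) "Solving" with
          | true =>
            simp only [pvLoopB, pvCollectA, hb1, hb2, Bool.not_true, Bool.not_false,
              Bool.and_true, Bool.and_false, Bool.false_or, if_true,
              if_false, Bool.false_eq_true]
            conv_rhs => rw [pvLoopA]
            simp only []
            split
            · exact ihEQ _
            · split
              · rw [ihCOL]; simp [pvFlush]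
              · exact ihEQ _
          | false =>
            simp only [pvLoopB, pvCollectA, hb1, hb2, Bool.not_false, Bool.and_true,
              Bool.false_or, if_true]
            exact ihCOL w (m ++ [PySem.Str.strip l])

-- ===== VERDICT (by name: the statement is the Claim_ definition above) =====
theorem summarize_solve_output_py_spec : Claim_equal_summarize_solve_output_py := by
  intro output _
  unfold Spec_summarize_solve_output_py summarize_solve_output_py summarize_solve_output_py_alt
  split
  · rfl
  · exact ((pvMain (PySem.Str.splitlines output).length _ le_rfl).1 []).symm
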